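-- pv_equiv track=rewrite | github.com/SiliconEngine/AdventOfCode2023-Python | Day24/day24_part2.py | factor_lt_1000
-- ===== SOURCE A (Python) =====
-- def factor_lt_1000(n):
--     n = abs(n)
--     factors = set()
--     for i in range(1, min(1000, int(n ** 0.5) + 1)):
--         if n % i == 0:
--             factors.add(i)
--             i2 = n // i
--             if i2 < 1000:
--                 factors.add(i2)
--
--     return sorted(factors)
-- ===== SOURCE B (Python) =====
-- def factor_lt_1000(n):
--     n = abs(n)
--     factors = []
--     for i in range(1, min(1000, n + 1)):
--         if n % i == 0:
--             factors.append(i)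
--     return factors
-- ===== Notes on version B (the rewrite author's own statement) =====
-- stated objective: simpler
-- what changed: Replaces the sqrt-bounded loop that derives large divisors as cofactors n//i collected in a set and then sorted by one flat trial-division loop over range(1, min(1000, n+1)) appending divisors directly, already ascending and duplicate-free so no set or sort is needed.
import Mathlib
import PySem

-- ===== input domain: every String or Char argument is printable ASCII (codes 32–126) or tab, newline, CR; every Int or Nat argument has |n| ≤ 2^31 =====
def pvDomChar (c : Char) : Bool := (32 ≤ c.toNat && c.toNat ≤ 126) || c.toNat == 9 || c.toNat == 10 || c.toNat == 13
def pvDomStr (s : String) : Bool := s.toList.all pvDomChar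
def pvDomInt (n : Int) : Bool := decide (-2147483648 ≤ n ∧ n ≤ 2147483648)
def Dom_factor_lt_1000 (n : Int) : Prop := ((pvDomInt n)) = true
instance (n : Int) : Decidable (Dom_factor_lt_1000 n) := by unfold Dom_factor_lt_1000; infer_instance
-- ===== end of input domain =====

-- B replaces A's sqrt-bounded loop with set/cofactor insertion and a final sort by one flat
-- trial-division loop appending divisors in ascending order (objective: simpler).

-- ===== PORT A =====
-- loop body of A: 'if n % i == 0: factors.add(i); i2 = n // i; if i2 < 1000: factors.add(i2)'
def factorBody (m : Int) (s : PySem.Set Int) (i : Int) : PySem.Set Int :=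
  if PySem.Int.mod m i = 0 then
    if PySem.Int.floordiv m i < 1000 then
      PySem.Set.add (PySem.Set.add s i) (PySem.Int.floordiv m i)
    else PySem.Set.add s i
  else s

-- 'int(n ** 0.5)' is ported as Int.sqrt: for 0 ≤ n ≤ 2^31 (the stated domain) the float
-- computation n ** 0.5 is the correctly rounded square root, so int() of it is exactly ⌊√n⌋.
def factor_lt_1000 (n : Int) : List Int :=
  let m : Int := |n|
  let factors : PySem.Set Int :=
    (PySem.List.pyRange 1 (min 1000 (Int.sqrt m + 1)) 1).foldl (factorBody m) PySem.Set.empty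
  PySem.List.sorted factors (fun x => x) false

-- ===== PORT B =====
def factor_lt_1000_alt (n : Int) : List Int :=
  let m : Int := |n|
  (PySem.List.pyRange 1 (min 1000 (m + 1)) 1).foldl
    (fun acc i => if PySem.Int.mod m i = 0 then acc ++ [i] else acc) []

-- ===== PRECONDITION & SPEC =====
def Spec_factor_lt_1000 (n : Int) (out : List Int) : Prop := out = factor_lt_1000_alt n
instance (n : Int) (out : List Int) : Decidable (Spec_factor_lt_1000 n out) := by unfold Spec_factor_lt_1000; infer_instance

-- ===== CLAIM (what is proved, stated in full; the proofs are below) =====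
def Claim_equal_factor_lt_1000 : Prop := ∀ (n : Int), Dom_factor_lt_1000 n → Spec_factor_lt_1000 n (factor_lt_1000 n)

-- ===== LEMMAS AND PROOFS =====

-- membership in the set A's loop builds
lemma mem_foldl_factorBody (m x : Int) (l : List Int) (s0 : PySem.Set Int) :
    x ∈ l.foldl (factorBody m) s0 ↔
      x ∈ s0 ∨ ∃ i ∈ l, PySem.Int.mod m i = 0 ∧
        (x = i ∨ (x = PySem.Int.floordiv m i ∧ PySem.Int.floordiv m i < 1000)) := by
  induction l generalizing s0 with
  | nil => simp
  | cons a t ih =>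
    simp only [List.foldl_cons, ih, List.mem_cons]
    unfold factorBody
    split_ifs with h1 h2
    · simp only [PySem.Set.mem_add]; aesop
    · simp only [PySem.Set.mem_add]
      constructor
      · aesop
      · rintro (h | ⟨i, hi, hmod, hx⟩)
        · aesop
        · rcases hi with rfl | hi
          · rcases hx with rfl | ⟨rfl, hlt⟩
            · exact Or.inl (Or.inr rfl)
            · omega
          · exact Or.inr ⟨i, hi, hmod, hx⟩
    · aesop

lemma nodup_foldl_factorBody (m : Int) (l : List Int) (s0 : PySem.Set Int)
    (h : s0.Nodup) : (l.foldl (factorBody m) s0).Nodup := by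
  induction l generalizing s0 with
  | nil => exact h
  | cons a t ih =>
    refine ih _ ?_
    unfold factorBody
    split_ifs with h1 h2
    · exact PySem.Set.nodup_add _ _ (PySem.Set.nodup_add _ _ h)
    · exact PySem.Set.nodup_add _ _ h
    · exact h

-- the arithmetic core: i ranges over [1, min(1000, ⌊√k⌋+1)) and yields i and k//i (< 1000)
-- exactly when x ranges over the divisors of k in [1, min(1000, k+1))
lemma key_iff (k : Nat) (x : Int) :
    (∃ i : Int, (1 ≤ i ∧ i < min 1000 (Int.sqrt (k:Int) + 1)) ∧ PySem.Int.mod (k:Int) i = 0 ∧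
      (x = i ∨ (x = PySem.Int.floordiv (k:Int) i ∧ PySem.Int.floordiv (k:Int) i < 1000)))
    ↔ ((1 ≤ x ∧ x < min 1000 ((k:Int) + 1)) ∧ PySem.Int.mod (k:Int) x = 0) := by
  have hs : Int.sqrt (k:Int) = (Nat.sqrt k : Int) := by simp [Int.sqrt]
  have hsle : (Nat.sqrt k : Int) ≤ (k:Int) := by exact_mod_cast Nat.sqrt_le_self k
  have hssq : (k:Int) < ((Nat.sqrt k : Int)+1) * ((Nat.sqrt k : Int)+1) := by
    exact_mod_cast Nat.lt_succ_sqrt k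
  have hs0 : 0 ≤ (Nat.sqrt k : Int) := by positivity
  rw [hs]
  set s : Int := (Nat.sqrt k : Int)
  constructor
  · rintro ⟨i, ⟨hi1, hi2⟩, hmod, hx⟩
    have hipos : 0 < i := hi1
    have hdvd : i ∣ (k:Int) := (PySem.Int.mod_eq_zero_iff_dvd _ _).mp hmod
    obtain ⟨c, hc⟩ := hdvd
    have hfd : PySem.Int.floordiv (k:Int) i = c := by
      rw [PySem.Int.floordiv_eq_ediv_of_pos hipos, hc, Int.mul_ediv_cancel_left _ (by omega)]
    have hk1 : 1 ≤ (k:Int) := by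
      have : i ≤ s := by omega
      omega
    have hc1 : 1 ≤ c := by nlinarith
    rcases hx with rfl | ⟨rfl, hlt⟩
    · exact ⟨⟨hi1, by omega⟩, hmod⟩
    · rw [hfd] at hlt ⊢
      have hcle : c ≤ (k:Int) := Int.le_of_dvd (by omega) ⟨i, by linarith [hc]⟩
      refine ⟨⟨hc1, by omega⟩, ?_⟩
      rw [PySem.Int.mod_eq_zero_iff_dvd]
      exact ⟨i, by linarith [hc]⟩
  · rintro ⟨⟨hx1, hx2⟩, hmod⟩
    have hxpos : 0 < x := hx1
    have hdvd : x ∣ (k:Int) := (PySem.Int.mod_eq_zero_iff_dvd _ _).mp hmod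
    have hk1 : 1 ≤ (k:Int) := by omega
    by_cases hcase : x ≤ s
    · exact ⟨x, ⟨hx1, by omega⟩, hmod, Or.inl rfl⟩
    · rw [not_le] at hcase
      obtain ⟨c, hc⟩ := hdvd
      have hfd : PySem.Int.floordiv (k:Int) x = c := by
        rw [PySem.Int.floordiv_eq_ediv_of_pos hxpos, hc, Int.mul_ediv_cancel_left _ (by omega)]
      have hc1 : 1 ≤ c := by nlinarith
      have hcpos : 0 < c := hc1
      have hcs : c ≤ s := by nlinarith
      refine ⟨c, ⟨hc1, by omega⟩, ?_, ?_⟩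
      · rw [PySem.Int.mod_eq_zero_iff_dvd]; exact ⟨x, by linarith [hc]⟩
      · right
        have hfd2 : PySem.Int.floordiv (k:Int) c = x := by
          rw [PySem.Int.floordiv_eq_ediv_of_pos hcpos, hc, mul_comm,
            Int.mul_ediv_cancel_left _ (by omega)]
        rw [hfd2]; exact ⟨rfl, by omega⟩

-- B's fold is a filter of the range
lemma alt_eq_filter (n : Int) :
    factor_lt_1000_alt n =
      (PySem.List.pyRange 1 (min 1000 (|n| + 1)) 1).filter
        (fun i => decide (PySem.Int.mod |n| i = 0)) := by
  unfold factor_lt_1000_alt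
  rw [PySem.List.foldl_append_ite_eq_filter]
  simp

-- ===== VERDICT (by name: the statement is the Claim_ definition above) =====
theorem factor_lt_1000_spec : Claim_equal_factor_lt_1000 := by
  intro n _
  unfold Spec_factor_lt_1000 factor_lt_1000
  rw [alt_eq_filter]
  have hk : |n| = (n.natAbs : Int) := Int.abs_eq_natAbs n
  dsimp only
  refine PySem.List.sorted_eq_of_perm_of_pairwise_lt _ _ (fun x : Int => x) ?_ ?_
  · refine (List.perm_ext_iff_of_nodup ?_ ?_).mpr ?_
    · exact (PySem.List.nodup_pyRange_one _ _).filter _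
    · exact nodup_foldl_factorBody _ _ _ List.nodup_nil
    · intro x
      simp only [List.mem_filter, PySem.List.mem_pyRange_one, mem_foldl_factorBody,
        decide_eq_true_eq]
      rw [hk]
      rw [← key_iff n.natAbs x]
      simp [PySem.Set.empty]
  · simpa using (PySem.List.pairwise_lt_pyRange_one 1 (min 1000 (|n| + 1))).filter _
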